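-- pv_equiv track=rewrite | github.com/E16-lisha/30DaysOfPython | Jour16_30_Days_Of_Python.py | statistiques_completes
-- ===== SOURCE A (Python) =====
-- def statistiques_completes(moyennes):
--     nb_echecs = 0
--     nb_passable = 0
--     nb_assez_bien = 0
--     nb_bien = 0
--     nb_tres_bien = 0
--     for element in moyennes:
--         if element < 10:
--             nb_echecs = nb_echecs + 1
--         elif element >= 10 and element < 12:
--             nb_passable = nb_passable + 1
--         elif element >= 12 and element < 14:
--             nb_assez_bien = nb_assez_bien + 1
--         elif element >= 14 and element < 16:
--             nb_bien = nb_bien + 1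
--         elif element >= 16 and element <= 20:
--             nb_tres_bien = nb_tres_bien + 1
--     mentions = {}
--     mentions["Nombre de pesonnes échouées"] = nb_echecs
--     mentions["Nombre de mentions passables"] = nb_passable
--     mentions["Nombre de mentions ABien"] = nb_assez_bien
--     mentions["Nombre de mentions Bien"] = nb_bien
--     mentions["Nombre de mentions TBien"] = nb_tres_bien
--     return mentions
-- ===== SOURCE B (Python) =====
-- def statistiques_completes(moyennes):
--     cles = [
--         "Nombre de pesonnes échouées",
--         "Nombre de mentions passables",
--         "Nombre de mentions ABien",
--         "Nombre de mentions Bien",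
--         "Nombre de mentions TBien",
--     ]
--     valides = [x for x in moyennes if x <= 20]
--     # cumulative counts: how many valid values lie strictly below each cutoff
--     below = [sum(1 for x in valides if x < c) for c in (10, 12, 14, 16, 21)]
--     comptes = [haut - bas for bas, haut in zip([0] + below, below)]
--     return dict(zip(cles, comptes))
-- ===== Notes on version B (the rewrite author's own statement) =====
-- stated objective: alternative
-- what changed: Instead of a single pass with five named counters and an elif chain, B filters out too-large values, computes the cumulative count of values strictly below each bucket's upper cutoff in staged counting passes, and obtains each bucket as the difference of adjacent cumulative counts.
import Mathlib
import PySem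

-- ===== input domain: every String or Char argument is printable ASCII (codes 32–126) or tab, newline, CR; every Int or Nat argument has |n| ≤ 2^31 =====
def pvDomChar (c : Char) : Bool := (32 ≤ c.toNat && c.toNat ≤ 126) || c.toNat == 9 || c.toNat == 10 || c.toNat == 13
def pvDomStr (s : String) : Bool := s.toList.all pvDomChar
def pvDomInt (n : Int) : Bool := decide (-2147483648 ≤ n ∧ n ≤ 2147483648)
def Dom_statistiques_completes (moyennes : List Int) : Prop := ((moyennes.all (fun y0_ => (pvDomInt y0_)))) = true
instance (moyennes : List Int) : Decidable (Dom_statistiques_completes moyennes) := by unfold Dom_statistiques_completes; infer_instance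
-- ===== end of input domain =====

-- B replaces A's single-pass five-counter elif chain by staged counting passes:
-- cumulative counts below each cutoff on the filtered list, then adjacent differences (objective: alternative).

-- ===== PORT A =====
def pvStepA (s : Int × Int × Int × Int × Int) (element : Int) : Int × Int × Int × Int × Int :=
  let (ne, np, na, nb, nt) := s
  if element < 10 then (ne + 1, np, na, nb, nt)
  else if element ≥ 10 ∧ element < 12 then (ne, np + 1, na, nb, nt)
  else if element ≥ 12 ∧ element < 14 then (ne, np, na + 1, nb, nt)
  else if element ≥ 14 ∧ element < 16 then (ne, np, na, nb + 1, nt)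
  else if element ≥ 16 ∧ element ≤ 20 then (ne, np, na, nb, nt + 1)
  else (ne, np, na, nb, nt)

def statistiques_completes (moyennes : List Int) : List (String × Int) :=
  let s := moyennes.foldl pvStepA (0, 0, 0, 0, 0)
  let (ne, np, na, nb, nt) := s
  (((((PySem.Dict.empty.insert "Nombre de pesonnes échouées" ne).insert
      "Nombre de mentions passables" np).insert
      "Nombre de mentions ABien" na).insert
      "Nombre de mentions Bien" nb).insert
      "Nombre de mentions TBien" nt).items

-- ===== PORT B =====
def pvCles : List String :=
  ["Nombre de pesonnes échouées", "Nombre de mentions passables",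
   "Nombre de mentions ABien", "Nombre de mentions Bien", "Nombre de mentions TBien"]

def statistiques_completes_alt (moyennes : List Int) : List (String × Int) :=
  let valides := moyennes.filter (fun x => x ≤ 20)
  let below := ([10, 12, 14, 16, 21] : List Int).map
    (fun c => (valides.countP (fun x => decide (x < c)) : Int))
  let comptes := ((0 :: below).zip below).map (fun p => p.2 - p.1)
  (PySem.Dict.ofList (pvCles.zip comptes)).items

-- ===== PRECONDITION & SPEC =====
def Spec_statistiques_completes (moyennes : List Int) (out : List (String × Int)) : Prop := out = statistiques_completes_alt moyennes
instance (moyennes : List Int) (out : List (String × Int)) : Decidable (Spec_statistiques_completes moyennes out) := by unfold Spec_statistiques_completes; infer_instance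

-- ===== CLAIM =====
def Claim_equal_statistiques_completes : Prop := ∀ (moyennes : List Int), Dom_statistiques_completes moyennes → Spec_statistiques_completes moyennes (statistiques_completes moyennes)

-- ===== LEMMAS AND PROOFS =====

def pvCnt (c : Int) (xs : List Int) : Int :=
  ((xs.filter (fun x => x ≤ 20)).countP (fun x => decide (x < c)) : Int)

theorem pvLoop (xs : List Int) (a b c d t : Int) :
    xs.foldl pvStepA (a, b, c, d, t) =
      (a + pvCnt 10 xs, b + (pvCnt 12 xs - pvCnt 10 xs), c + (pvCnt 14 xs - pvCnt 12 xs),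
       d + (pvCnt 16 xs - pvCnt 14 xs), t + (pvCnt 21 xs - pvCnt 16 xs)) := by
  induction xs generalizing a b c d t with
  | nil => simp [pvCnt]
  | cons x xs ih =>
    rw [List.foldl_cons]
    have hc : ∀ k : Int, pvCnt k (x :: xs) =
        pvCnt k xs + (if x ≤ 20 ∧ x < k then 1 else 0) := by
      intro k
      simp only [pvCnt, List.filter_cons]
      split_ifs with h1 h2 h3 <;>
        simp_all
    simp only [pvStepA]
    split_ifs with h1 h2 h3 h4 h5 <;>
      rw [ih] <;> simp only [hc, Prod.mk.injEq] <;>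
      refine ⟨?_, ?_, ?_, ?_, ?_⟩ <;> (split_ifs <;> omega)

theorem statistiques_completes_eq (moyennes : List Int) :
    statistiques_completes moyennes = statistiques_completes_alt moyennes := by
  unfold statistiques_completes statistiques_completes_alt
  rw [pvLoop]
  simp only [pvCles, List.map_cons, List.map_nil, List.zip_cons_cons, List.zip_nil_right]
  apply congrArg PySem.Dict.items
  apply PySem.Dict.ext
  simp [PySem.Dict.insert, PySem.Dict.empty, PySem.Dict.ofList, PySem.Dict.update, pvCnt]

-- ===== VERDICT =====
theorem statistiques_completes_spec : Claim_equal_statistiques_completes := by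
  intro moyennes _
  exact statistiques_completes_eq moyennes
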